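-- pv_equiv track=rewrite | github.com/maxmurtazin/Ant-RH | core/ncg_braid_spectral.py | reduce_free_inverse
-- ===== SOURCE A (Python) =====
-- from typing import Any, Iterable, List, Sequence, Tuple, Dict, Optional, Union
--
-- BraidGen = Tuple[int, int]  # (i, sign), represents sigma_i^{sign}, sign in {-1,+1}
--
-- BraidWord = Tuple[BraidGen, ...]
--
-- def reduce_free_inverse(word: BraidWord) -> BraidWord:
--     """Simple cancellation sigma_i sigma_i^{-1} -> e. Does not solve full braid normal form."""
--     stack: List[BraidGen] = []
--     for g in word:
--         if stack and stack[-1][0] == g[0] and stack[-1][1] == -g[1]: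
--             stack.pop()
--         else:
--             stack.append(g)
--     return tuple(stack)
-- ===== SOURCE B (Python) =====
-- def reduce_free_inverse(word):
--     """Fixpoint free reduction: repeatedly delete the first adjacent inverse pair."""
--     w = list(word)
--     changed = True
--     while changed:
--         changed = False
--         i = 0
--         while i + 1 < len(w):
--             if w[i][0] == w[i + 1][0] and w[i][1] == -w[i + 1][1]:
--                 del w[i:i + 2]
--                 changed = True
--                 break
--             i += 1
--     return tuple(w)
-- ===== Notes on version B (the rewrite author's own statement) =====
-- stated objective: alternative
-- what changed: Replaces the single-pass stack reducer by a naive fixpoint reducer that repeatedly scans for and deletes the first adjacent inverse pair until no deletion applies; the free-reduced normal form is unique, so results coincide.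
import Mathlib
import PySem

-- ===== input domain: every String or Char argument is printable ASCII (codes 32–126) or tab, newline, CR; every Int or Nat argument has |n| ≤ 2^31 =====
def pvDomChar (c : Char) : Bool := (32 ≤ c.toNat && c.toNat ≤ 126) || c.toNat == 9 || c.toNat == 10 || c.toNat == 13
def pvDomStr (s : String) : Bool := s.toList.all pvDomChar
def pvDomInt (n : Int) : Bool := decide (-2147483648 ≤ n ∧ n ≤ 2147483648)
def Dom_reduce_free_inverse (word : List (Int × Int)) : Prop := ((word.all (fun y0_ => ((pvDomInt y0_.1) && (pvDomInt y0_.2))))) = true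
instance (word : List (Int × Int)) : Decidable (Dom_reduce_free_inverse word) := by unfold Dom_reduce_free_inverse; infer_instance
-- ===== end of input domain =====

-- B replaces the single-pass stack reducer by a fixpoint reducer (delete first adjacent inverse pair, rescan); same output, no speed claim.

-- ===== PORT A =====
-- 'stack and stack[-1][0] == g[0] and stack[-1][1] == -g[1]' then pop, else append
def pvStep (stack : List (Int × Int)) (g : Int × Int) : List (Int × Int) :=
  match stack.getLast? with
  | some t => if t.1 == g.1 && t.2 == -g.2 then stack.dropLast else stack ++ [g]
  | none => stack ++ [g]

def reduce_free_inverse (word : List (Int × Int)) : List (Int × Int) :=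
  word.foldl pvStep []

-- ===== PORT B =====
-- inner while loop of Source B: delete the FIRST adjacent inverse pair, or report none
def pvScan : List (Int × Int) → Option (List (Int × Int))
  | a :: b :: r =>
      if a.1 == b.1 && a.2 == -b.2 then some r
      else (pvScan (b :: r)).map (a :: ·)
  | _ => none

theorem pvScan_length : ∀ {w w' : List (Int × Int)}, pvScan w = some w' → w'.length + 2 = w.length := by
  intro w
  induction w with
  | nil => intro w' h; simp [pvScan] at h
  | cons a r ih =>
    intro w' h
    match r with
    | [] => simp [pvScan] at h
    | b :: r' =>
      simp only [pvScan] at h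
      split at h
      · cases h; simp
      · simp only [Option.map_eq_some_iff] at h
        obtain ⟨u, hu, rfl⟩ := h
        simpa using ih hu

-- outer while loop of Source B: repeat until a full scan deletes nothing
def reduce_free_inverse_alt (word : List (Int × Int)) : List (Int × Int) :=
  match h : pvScan word with
  | some w' => reduce_free_inverse_alt w'
  | none => word
termination_by word.length
decreasing_by
  have := pvScan_length h
  omega

-- ===== PRECONDITION & SPEC =====
def Spec_reduce_free_inverse (word : List (Int × Int)) (out : List (Int × Int)) : Prop := out = reduce_free_inverse_alt word
instance (word : List (Int × Int)) (out : List (Int × Int)) : Decidable (Spec_reduce_free_inverse word out) := by unfold Spec_reduce_free_inverse; infer_instance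

-- ===== CLAIM (what is proved, stated in full; the proofs are below) =====
def Claim_equal_reduce_free_inverse : Prop := ∀ (word : List (Int × Int)), Dom_reduce_free_inverse word → Spec_reduce_free_inverse word (reduce_free_inverse word)

-- ===== LEMMAS AND PROOFS =====

-- 'no adjacent inverse pair' (free-reduced), scanned from the front
def pvRed : List (Int × Int) → Bool
  | a :: b :: r => !(a.1 == b.1 && a.2 == -b.2) && pvRed (b :: r)
  | _ => true

theorem pvRed_tail {x : Int × Int} {t : List (Int × Int)} (h : pvRed (x :: t) = true) :
    pvRed t = true := by
  match t with
  | [] => rfl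
  | z :: t' =>
    simp only [pvRed, Bool.and_eq_true] at h
    exact h.2

theorem pvRed_cons (x : Int × Int) (t : List (Int × Int)) (ht : pvRed t = true)
    (h : ∀ z t', t = z :: t' → (x.1 == z.1 && x.2 == -z.2) = false) : pvRed (x :: t) = true := by
  match t with
  | [] => rfl
  | z :: t' =>
    simp only [pvRed, Bool.and_eq_true, Bool.not_eq_true']
    exact ⟨h z t' rfl, ht⟩

theorem pvStep_cases (s : List (Int × Int)) (g : Int × Int) :
    pvStep s g = s.dropLast ∨ pvStep s g = s ++ [g] := by
  unfold pvStep
  cases s.getLast? with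
  | none => right; rfl
  | some t =>
    by_cases hc : (t.1 == g.1 && t.2 == -g.2) = true
    · left; simp [hc]
    · right; simp [hc]

theorem pvStep_cons {x : Int × Int} {s : List (Int × Int)} (hs : s ≠ []) (g : Int × Int) :
    pvStep (x :: s) g = x :: pvStep s g := by
  match s, hs with
  | y :: r, _ =>
    have hne : (y :: r : List (Int × Int)) ≠ [] := by simp
    simp only [pvStep, List.getLast?_cons_cons, List.getLast?_eq_some_getLast hne]
    by_cases hc : (((y :: r).getLast hne).1 == g.1 && ((y :: r).getLast hne).2 == -g.2) = true
    · simp [hc]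
    · simp [hc]

theorem pvStep_head (y : Int × Int) (r : List (Int × Int)) (g : Int × Int) :
    pvStep (y :: r) g = [] ∨ ∃ t, pvStep (y :: r) g = y :: t := by
  rcases pvStep_cases (y :: r) g with h | h
  · match r with
    | [] => left; simpa using h
    | z :: r' => right; exact ⟨(z :: r').dropLast, by simpa using h⟩
  · right; exact ⟨r ++ [g], by simpa using h⟩

theorem pvRed_step {s : List (Int × Int)} (hs : pvRed s = true) (g : Int × Int) :
    pvRed (pvStep s g) = true := by
  induction s with
  | nil => simp [pvStep, pvRed]
  | cons x s ih =>
    match s with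
    | [] =>
      simp only [pvStep, List.getLast?_singleton]
      split
      · rfl
      · rename_i hc
        have hf : (x.1 == g.1 && x.2 == -g.2) = false := Bool.eq_false_iff.mpr hc
        simp [pvRed, hf]
    | y :: r =>
      have hs' : pvRed (y :: r) = true := pvRed_tail hs
      have hxy : (x.1 == y.1 && x.2 == -y.2) = false := by
        simp only [pvRed, Bool.and_eq_true, Bool.not_eq_true'] at hs
        exact hs.1
      rw [pvStep_cons (by simp) g]
      refine pvRed_cons x _ (ih hs') ?_
      intro z t' heq
      rcases pvStep_head y r g with h | ⟨t, h⟩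
      · rw [h] at heq; cases heq
      · rw [h] at heq
        cases heq
        exact hxy

theorem pvRed_last_two : ∀ (l : List (Int × Int)) (u t : Int × Int),
    pvRed (l ++ [u, t]) = true → (u.1 == t.1 && u.2 == -t.2) = false := by
  intro l
  induction l with
  | nil =>
    intro u t h
    simp only [List.nil_append, pvRed, Bool.and_eq_true, Bool.not_eq_true'] at h
    exact h.1
  | cons x l ih =>
    intro u t h
    exact ih u t (pvRed_tail (by simpa using h))

theorem pvRed_append_left : ∀ (l r : List (Int × Int)), pvRed (l ++ r) = true → pvRed l = true := by
  intro l
  induction l with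
  | nil => intro r _; rfl
  | cons x l ih =>
    intro r h
    match l with
    | [] => rfl
    | y :: l' =>
      simp only [List.cons_append, pvRed, Bool.and_eq_true] at h ⊢
      exact ⟨h.1, ih r h.2⟩

theorem dropLast_concat_getLast {l : List (Int × Int)} {t : Int × Int}
    (h : l.getLast? = some t) : l.dropLast ++ [t] = l := by
  have hne : l ≠ [] := by intro hn; subst hn; simp at h
  rw [List.getLast?_eq_some_getLast hne] at h
  injection h with h'
  rw [← h']
  exact List.dropLast_append_getLast hne

-- core cancellation: on a reduced stack, pushing a then b (an inverse pair) is the identity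
theorem pvStep_cancel {s : List (Int × Int)} (hs : pvRed s = true) {a b : Int × Int}
    (hab : (a.1 == b.1 && a.2 == -b.2) = true) : pvStep (pvStep s a) b = s := by
  have hab' := Bool.and_eq_true_iff.mp hab
  have hab1 : a.1 = b.1 := by simpa using hab'.1
  have hab2 : a.2 = -b.2 := by simpa using hab'.2
  cases hlast : s.getLast? with
  | none =>
    have hnil : s = [] := List.getLast?_eq_none_iff.mp hlast
    subst hnil
    simp [pvStep, hab]
  | some t =>
    by_cases hc : (t.1 == a.1 && t.2 == -a.2) = true
    · have hc' := Bool.and_eq_true_iff.mp hc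
      have ht1 : t.1 = b.1 := by have : t.1 = a.1 := by simpa using hc'.1
                                 omega
      have ht2 : t.2 = b.2 := by have : t.2 = -a.2 := by simpa using hc'.2
                                 omega
      have hbt : b = t := Prod.ext_iff.mpr ⟨ht1.symm, ht2.symm⟩
      have hstep1 : pvStep s a = s.dropLast := by simp [pvStep, hlast, hc]
      rw [hstep1]
      cases hlast2 : s.dropLast.getLast? with
      | none =>
        have hdnil : s.dropLast = [] := List.getLast?_eq_none_iff.mp hlast2
        have hs_eq : s = [t] := by
          have := dropLast_concat_getLast hlast
          rw [hdnil] at this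
          simpa using this.symm
        rw [hdnil, hs_eq]
        simp [pvStep, hbt]
      | some u =>
        have hut : (u.1 == t.1 && u.2 == -t.2) = false := by
          apply pvRed_last_two s.dropLast.dropLast
          rw [show s.dropLast.dropLast ++ [u, t] = (s.dropLast.dropLast ++ [u]) ++ [t] by simp,
             dropLast_concat_getLast hlast2, dropLast_concat_getLast hlast]
          exact hs
        have hub : (u.1 == b.1 && u.2 == -b.2) = false := by rw [hbt]; exact hut
        simp only [pvStep, hlast2, hub, Bool.false_eq_true, if_false]
        rw [hbt]
        exact dropLast_concat_getLast hlast
    · have hstep1 : pvStep s a = s ++ [a] := by simp [pvStep, hlast, hc]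
      rw [hstep1]
      simp [pvStep, hab]

-- one deletion does not change the stack result
theorem foldl_scan {w w' : List (Int × Int)} (h : pvScan w = some w') :
    ∀ {s : List (Int × Int)}, pvRed s = true → w.foldl pvStep s = w'.foldl pvStep s := by
  induction w generalizing w' with
  | nil => simp [pvScan] at h
  | cons a r ih =>
    match r with
    | [] => simp [pvScan] at h
    | b :: r' =>
      intro s hs
      simp only [pvScan] at h
      split at h
      · cases h
        simp only [List.foldl_cons]
        rw [pvStep_cancel hs (by assumption)]
      · simp only [Option.map_eq_some_iff] at h
        obtain ⟨u, hu, rfl⟩ := h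
        simp only [List.foldl_cons]
        exact ih hu (pvRed_step hs a)

-- a reduced word passes through the stack unchanged
theorem foldl_red : ∀ (w s : List (Int × Int)), pvRed (s ++ w) = true → w.foldl pvStep s = s ++ w := by
  intro w
  induction w with
  | nil => intro s _; simp
  | cons g w' ih =>
    intro s h
    have hstep : pvStep s g = s ++ [g] := by
      cases hlast : s.getLast? with
      | none => simp [pvStep, hlast]
      | some t =>
        have htg : (t.1 == g.1 && t.2 == -g.2) = false := by
          apply pvRed_last_two s.dropLast
          apply pvRed_append_left _ w'
          rw [show s.dropLast ++ [t, g] ++ w' = (s.dropLast ++ [t]) ++ (g :: w') by simp,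
             dropLast_concat_getLast hlast]
          exact h
        simp [pvStep, hlast, htg]
    simp only [List.foldl_cons, hstep]
    rw [ih (s ++ [g]) (by simpa using h)]
    simp

-- a word with no deletable pair is reduced
theorem pvScan_none_red : ∀ {w : List (Int × Int)}, pvScan w = none → pvRed w = true := by
  intro w
  induction w with
  | nil => intro _; rfl
  | cons a r ih =>
    intro h
    match r with
    | [] => rfl
    | b :: r' =>
      simp only [pvScan] at h
      split at h
      · simp at h
      · rename_i hc
        simp only [Option.map_eq_none_iff] at h
        simp only [pvRed, Bool.and_eq_true, Bool.not_eq_true']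
        exact ⟨Bool.eq_false_iff.mpr hc, ih h⟩

theorem alt_eq_foldl : ∀ (w : List (Int × Int)), reduce_free_inverse_alt w = w.foldl pvStep [] := by
  have H : ∀ (n : Nat) (w : List (Int × Int)), w.length = n →
      reduce_free_inverse_alt w = w.foldl pvStep [] := by
    intro n
    induction n using Nat.strong_induction_on with
    | _ n ih =>
      intro w hw
      rw [reduce_free_inverse_alt]
      split
      · rename_i w' h
        have hl := pvScan_length h
        rw [ih w'.length (by omega) w' rfl]
        exact (foldl_scan h rfl).symm
      · rename_i h
        simpa using (foldl_red w [] (by simpa using pvScan_none_red h)).symm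
  intro w
  exact H w.length w rfl

-- ===== VERDICT (by name: the statement is the Claim_ definition above) =====
theorem reduce_free_inverse_spec : Claim_equal_reduce_free_inverse := by
  intro word _
  unfold Spec_reduce_free_inverse reduce_free_inverse
  rw [alt_eq_foldl]
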